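-- pv_equiv track=rewrite | github.com/ammargit93/api | app.py | format_to_points
-- ===== SOURCE A (Python) =====
-- def format_to_points(text, use_numbers=False):
--     lines = [line.strip() for line in text.split('\n') if line.strip()]
--     formatted_points = []
--     current_point = ""
--     for line in lines:
--         if any(line.startswith(f"{i})") for i in range(1, 10)):  # Check for 1), 2), ... 9)
--             if current_point:
--                 formatted_points.append(current_point.strip())
--             current_point = line
--         elif line.startswith('-') or line.startswith('*') or line.startswith('<') or line.startswith('#'):
--             if current_point:
--                 formatted_points.append(current_point.strip())
--             current_point = line[1:].strip()
--         else:
--             current_point += " " + line.strip()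
--     if current_point:
--         formatted_points.append(current_point.strip())
--     if use_numbers:
--         formatted_text = "\n".join(f"{i + 1}) {point}" for i, point in enumerate(formatted_points))
--     else:
--         formatted_text = "\n".join(f"- {point}" for point in formatted_points)
--     return formatted_text
-- ===== SOURCE B (Python) =====
-- def _marker(line):
--     # classify a (non-empty, stripped) line: return the text that starts a new
--     # point, '' for an empty bullet head, or None for a continuation line
--     if len(line) >= 2 and line[0] in '123456789' and line[1] == ')':
--         return line
--     if line[0] in '-*<#':
--         return line[1:].strip()
--     return None
--
--
-- def format_to_points(text, use_numbers=False):
--     lines = [line.strip() for line in text.split('\n') if line.strip()]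
--     n = len(lines)
--     points = []
--     # leading run of continuation lines (before any marker) forms one point
--     j = 0
--     while j < n and _marker(lines[j]) is None:
--         j += 1
--     if j > 0:
--         points.append(" ".join(lines[0:j]))
--     i = j
--     # each marker line starts a segment; following continuation lines join it
--     while i < n:
--         head = _marker(lines[i])
--         j = i + 1
--         while j < n and _marker(lines[j]) is None:
--             j += 1
--         parts = ([head] if head else []) + lines[i + 1:j]
--         if parts:
--             points.append(" ".join(parts))
--         i = j
--     if use_numbers:
--         return "\n".join(f"{k + 1}) {p}" for k, p in enumerate(points))
--     return "\n".join(f"- {p}" for p in points)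
-- ===== Notes on version B (the rewrite author's own statement) =====
-- stated objective: alternative
-- what changed: A is a one-pass state machine accumulating a growing current_point string; B classifies each line once with a marker helper and processes the text segment-by-segment (leading continuation run, then marker-headed segments whose lines are combined with one ' '.join per point), never concatenating onto a running string.
import Mathlib
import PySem

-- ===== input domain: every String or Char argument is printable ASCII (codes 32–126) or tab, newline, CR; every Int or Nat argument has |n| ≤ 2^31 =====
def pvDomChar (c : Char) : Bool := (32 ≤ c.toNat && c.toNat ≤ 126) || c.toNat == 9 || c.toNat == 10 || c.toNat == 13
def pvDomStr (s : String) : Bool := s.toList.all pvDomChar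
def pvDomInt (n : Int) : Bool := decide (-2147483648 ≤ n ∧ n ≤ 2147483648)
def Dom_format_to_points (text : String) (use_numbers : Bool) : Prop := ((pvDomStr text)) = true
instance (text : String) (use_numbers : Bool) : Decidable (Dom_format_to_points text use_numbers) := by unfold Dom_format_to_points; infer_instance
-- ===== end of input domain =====

-- B re-decomposes A's running-string state machine into a marker classifier plus
-- segment-by-segment processing (objective: alternative, same cost).

-- ===== PORT A =====
/-- one iteration of A's for-loop; state = (formatted_points, current_point) -/
def pvAStep (st : List (List Char) × List Char) (line : List Char) :
    List (List Char) × List Char :=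
  if ((PySem.List.pyRange 1 10 1).any fun i =>
        PySem.Chars.startswith line (PySem.Int.toChars i ++ [')'])) then
    ((if st.2 ≠ [] then st.1 ++ [PySem.Chars.strip st.2] else st.1), line)
  else if PySem.Chars.startswith line ['-'] || PySem.Chars.startswith line ['*'] ||
      PySem.Chars.startswith line ['<'] || PySem.Chars.startswith line ['#'] then
    ((if st.2 ≠ [] then st.1 ++ [PySem.Chars.strip st.2] else st.1),
      PySem.Chars.strip (PySem.List.slice line (some 1) none))
  else
    (st.1, st.2 ++ ' ' :: PySem.Chars.strip line)

def format_to_points (text : String) (use_numbers : Bool) : String :=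
  let lines := ((PySem.Chars.splitOn text.toList ['\n']).map PySem.Chars.strip).filter
      (fun l => !l.isEmpty)
  let st := lines.foldl pvAStep ([], [])
  let pts := if st.2 ≠ [] then st.1 ++ [PySem.Chars.strip st.2] else st.1
  String.ofList (if use_numbers then
      PySem.Chars.join ['\n'] ((PySem.List.enumerate pts 0).map fun p =>
        PySem.Int.toChars (p.1 + 1) ++ ')' :: ' ' :: p.2)
    else
      PySem.Chars.join ['\n'] (pts.map fun p => '-' :: ' ' :: p))

-- ===== PORT B =====
/-- Source B's `_marker`: the text a marker line contributes, `none` = continuation.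
    (`line[1]` is `rest.headD` under the `len(line) >= 2` guard; Source B never calls
    `_marker` on an empty line, where the Lean version returns `none`.) -/
def pvMarker : List Char → Option (List Char)
  | [] => none
  | c :: rest =>
    if 1 ≤ rest.length ∧ c ∈ ['1', '2', '3', '4', '5', '6', '7', '8', '9'] ∧
        rest.headD ' ' = ')' then
      some (c :: rest)
    else if c ∈ ['-', '*', '<', '#'] then
      some (PySem.Chars.strip rest)
    else
      none

/-- Source B's second while-loop: one point per marker-headed segment. -/
def pvSegs : List (List Char) → List (List Char)
  | [] => []
  | l :: rest =>
    let cont := rest.takeWhile fun x => (pvMarker x).isNone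
    let parts := match pvMarker l with
      | some h => if h = [] then cont else h :: cont
      | none => l :: cont   -- unreachable: pvSegs is applied after the leading run is removed
    (if parts ≠ [] then [PySem.Chars.join [' '] parts] else []) ++
      pvSegs (rest.dropWhile fun x => (pvMarker x).isNone)
termination_by ls => ls.length
decreasing_by simpa using Nat.lt_succ_of_le (List.length_dropWhile_le _ _)

def format_to_points_alt (text : String) (use_numbers : Bool) : String :=
  let lines := ((PySem.Chars.splitOn text.toList ['\n']).map PySem.Chars.strip).filter
      (fun l => !l.isEmpty)
  let lead := lines.takeWhile fun x => (pvMarker x).isNone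
  let pts := (if lead ≠ [] then [PySem.Chars.join [' '] lead] else []) ++
      pvSegs (lines.dropWhile fun x => (pvMarker x).isNone)
  String.ofList (if use_numbers then
      PySem.Chars.join ['\n'] ((PySem.List.enumerate pts 0).map fun p =>
        PySem.Int.toChars (p.1 + 1) ++ ')' :: ' ' :: p.2)
    else
      PySem.Chars.join ['\n'] (pts.map fun p => '-' :: ' ' :: p))

-- ===== PRECONDITION & SPEC =====
def Spec_format_to_points (text : String) (use_numbers : Bool) (out : String) : Prop := out = format_to_points_alt text use_numbers
instance (text : String) (use_numbers : Bool) (out : String) : Decidable (Spec_format_to_points text use_numbers out) := by unfold Spec_format_to_points; infer_instance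

-- ===== CLAIM (what is proved, stated in full; the proofs are below) =====
def Claim_equal_format_to_points : Prop := ∀ (text : String) (use_numbers : Bool), Dom_format_to_points text use_numbers → Spec_format_to_points text use_numbers (format_to_points text use_numbers)


-- ===== LEMMAS AND PROOFS =====

/-- a cleaned line: nonempty and fixed by both one-sided strips -/
def pvGood (l : List Char) : Prop :=
  PySem.Chars.lstrip l = l ∧ PySem.Chars.rstrip l = l ∧ l ≠ []

theorem pv_dropWhile_idem {a : Type} (p : a → Bool) (l : List a) :
    (l.dropWhile p).dropWhile p = l.dropWhile p := by
  induction l with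
  | nil => rfl
  | cons x t ih =>
    by_cases h : p x
    · simpa [h] using ih
    · simp [h]

theorem pv_fix_head_false {a : Type} (p : a → Bool) (x : a) (t : List a)
    (hfix : (x :: t).dropWhile p = x :: t) : p x = false := by
  rw [List.dropWhile_cons] at hfix
  by_cases h : p x
  · rw [if_pos h] at hfix
    have hl := congrArg List.length hfix
    have h2 := List.length_dropWhile_le p t
    simp at hl
    omega
  · simpa using h

theorem pv_dropWhile_head_false {a : Type} (p : a → Bool) (l : List a) (x : a) (r : List a)
    (h : l.dropWhile p = x :: r) : p x = false := by
  induction l with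
  | nil => simp at h
  | cons b t ih =>
    rw [List.dropWhile_cons] at h
    by_cases hb : p b
    · rw [if_pos hb] at h; exact ih h
    · rw [if_neg hb] at h
      cases h
      simpa using hb

theorem pv_dropWhile_fix_append {a : Type} (p : a → Bool) (x u : List a) (hne : x ≠ [])
    (hfix : x.dropWhile p = x) : (x ++ u).dropWhile p = x ++ u := by
  cases x with
  | nil => exact absurd rfl hne
  | cons b t =>
    have hb : p b = false := pv_fix_head_false p b t hfix
    simp [hb]

theorem pv_rstrip_prefix (s : List Char) : PySem.Chars.rstrip s <+: s := by
  simp only [PySem.Chars.rstrip]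
  obtain ⟨t, ht⟩ := List.dropWhile_suffix (l := s.reverse) (PySem.Chars.isspace)
  refine ⟨t.reverse, ?_⟩
  have h2 := congrArg List.reverse ht
  simpa using h2

theorem pv_rstrip_fix_iff (s : List Char) :
    PySem.Chars.rstrip s = s ↔ s.reverse.dropWhile PySem.Chars.isspace = s.reverse := by
  simp only [PySem.Chars.rstrip]
  rw [List.reverse_eq_iff]

theorem pv_rstrip_idem (s : List Char) :
    PySem.Chars.rstrip (PySem.Chars.rstrip s) = PySem.Chars.rstrip s := by
  simp only [PySem.Chars.rstrip, List.reverse_reverse]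
  rw [pv_dropWhile_idem]

theorem pv_lstrip_rstrip (u : List Char) (hfix : PySem.Chars.lstrip u = u) :
    PySem.Chars.lstrip (PySem.Chars.rstrip u) = PySem.Chars.rstrip u := by
  cases hr : PySem.Chars.rstrip u with
  | nil => simp [PySem.Chars.lstrip]
  | cons b tb =>
    have hpre := pv_rstrip_prefix u
    rw [hr] at hpre
    obtain ⟨w, hw⟩ := hpre
    have hu : u = b :: (tb ++ w) := by rw [← hw]; simp
    have hb : PySem.Chars.isspace b = false := by
      rw [hu] at hfix
      exact pv_fix_head_false _ b (tb ++ w) hfix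
    simp [PySem.Chars.lstrip, hb]

theorem pv_good_strip (s : List Char) (h : PySem.Chars.strip s ≠ []) :
    pvGood (PySem.Chars.strip s) := by
  have h1 : PySem.Chars.strip s = PySem.Chars.rstrip (PySem.Chars.lstrip s) := rfl
  have hufix : PySem.Chars.lstrip (PySem.Chars.lstrip s) = PySem.Chars.lstrip s := by
    simpa only [PySem.Chars.lstrip] using pv_dropWhile_idem PySem.Chars.isspace s
  refine ⟨?_, ?_, h⟩
  · rw [h1]; exact pv_lstrip_rstrip _ hufix
  · rw [h1]; exact pv_rstrip_idem _

theorem pv_strip_good (b : List Char) (h : pvGood b) : PySem.Chars.strip b = b := by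
  have h1 : PySem.Chars.strip b = PySem.Chars.rstrip (PySem.Chars.lstrip b) := rfl
  rw [h1, h.1, h.2.1]

theorem pv_lstrip_append (l t : List Char) (h : pvGood l) :
    PySem.Chars.lstrip (l ++ t) = l ++ t := by
  simp only [PySem.Chars.lstrip] at *
  exact pv_dropWhile_fix_append _ l t h.2.2 h.1

theorem pv_rstrip_append (t l : List Char) (h : pvGood l) :
    PySem.Chars.rstrip (t ++ l) = t ++ l := by
  have h2 : l.reverse.dropWhile PySem.Chars.isspace = l.reverse := (pv_rstrip_fix_iff l).mp h.2.1
  rw [pv_rstrip_fix_iff, List.reverse_append]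
  exact pv_dropWhile_fix_append _ l.reverse t.reverse (by simpa using h.2.2) h2

theorem pv_good_glue (b c : List Char) (hb : pvGood b) (hc : pvGood c) :
    pvGood (b ++ ' ' :: c) := by
  refine ⟨pv_lstrip_append b (' ' :: c) hb, ?_, by simp⟩
  have h : b ++ ' ' :: c = (b ++ [' ']) ++ c := by simp
  rw [h]
  exact pv_rstrip_append _ c hc

theorem pv_join_glue (b c : List Char) (rest : List (List Char)) :
    PySem.Chars.join [' '] ((b ++ ' ' :: c) :: rest) = PySem.Chars.join [' '] (b :: c :: rest) := by
  cases rest with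
  | nil => simp [PySem.Chars.join_cons_cons, PySem.Chars.join_singleton]
  | cons r rs => simp [PySem.Chars.join_cons_cons, List.append_assoc]

theorem pv_strip_raw (conts : List (List Char)) (hc : ∀ c ∈ conts, pvGood c) :
    ∀ b, pvGood b →
      PySem.Chars.strip (b ++ conts.flatMap (' ' :: ·)) =
        PySem.Chars.join [' '] (b :: conts) := by
  induction conts with
  | nil =>
    intro b hb
    simpa [PySem.Chars.join_singleton] using pv_strip_good b hb
  | cons c rest ih =>
    intro b hb
    have hcg : pvGood c := hc c (by simp)
    have hglue := pv_good_glue b c hb hcg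
    have h1 : b ++ (c :: rest).flatMap (' ' :: ·) =
        (b ++ ' ' :: c) ++ rest.flatMap (' ' :: ·) := by
      simp [List.append_assoc]
    rw [h1, ih (fun x hx => hc x (by simp [hx])) _ hglue, pv_join_glue]

theorem pv_strip_raw_nil (conts : List (List Char)) (hc : ∀ c ∈ conts, pvGood c)
    (hne : conts ≠ []) :
    PySem.Chars.strip (conts.flatMap (' ' :: ·)) = PySem.Chars.join [' '] conts := by
  cases conts with
  | nil => exact absurd rfl hne
  | cons c rest =>
    have h1 : (c :: rest).flatMap (' ' :: ·) = ' ' :: (c ++ rest.flatMap (' ' :: ·)) := by simp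
    have hsp : PySem.Chars.isspace ' ' = true := by decide
    have h2 : PySem.Chars.strip (' ' :: (c ++ rest.flatMap (' ' :: ·))) =
        PySem.Chars.strip (c ++ rest.flatMap (' ' :: ·)) := by
      simp only [PySem.Chars.strip, PySem.Chars.lstrip]
      rw [List.dropWhile_cons, if_pos hsp]
    rw [h1, h2, pv_strip_raw rest (fun x hx => hc x (by simp [hx])) c (hc c (by simp))]

/-- startswith on a one-char pattern, unfolded -/
theorem pv_sw1 (x c : Char) (rest : List Char) :
    PySem.Chars.startswith (c :: rest) [x] = (x == c) := by
  simp only [PySem.Chars.startswith, List.isPrefixOf, Bool.and_true]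

/-- a one-element line never starts with "i)" -/
theorem pv_sw2nil (x c : Char) : PySem.Chars.startswith [c] [x, ')'] = false := by
  simp only [PySem.Chars.startswith, List.isPrefixOf, Bool.and_false]

/-- startswith on a two-char pattern, unfolded -/
theorem pv_sw2 (x c d : Char) (t : List Char) :
    PySem.Chars.startswith (c :: d :: t) [x, ')'] = (x == c && ')' == d) := by
  simp only [PySem.Chars.startswith, List.isPrefixOf, Bool.and_true]

/-- A's numbered-line test, in pvMarker's terms -/
theorem pv_be_num (c : Char) (rest : List Char) :
    ((PySem.List.pyRange 1 10 1).any fun i =>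
        PySem.Chars.startswith (c :: rest) (PySem.Int.toChars i ++ [')'])) =
      decide (1 ≤ rest.length ∧ c ∈ ['1', '2', '3', '4', '5', '6', '7', '8', '9'] ∧
        rest.headD ' ' = ')') := by
  rw [show PySem.List.pyRange 1 10 1 = [1, 2, 3, 4, 5, 6, 7, 8, 9] from by decide]
  simp only [List.any_cons, List.any_nil,
    show PySem.Int.toChars 1 = ['1'] from rfl, show PySem.Int.toChars 2 = ['2'] from rfl,
    show PySem.Int.toChars 3 = ['3'] from rfl, show PySem.Int.toChars 4 = ['4'] from rfl,
    show PySem.Int.toChars 5 = ['5'] from rfl, show PySem.Int.toChars 6 = ['6'] from rfl,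
    show PySem.Int.toChars 7 = ['7'] from rfl, show PySem.Int.toChars 8 = ['8'] from rfl,
    show PySem.Int.toChars 9 = ['9'] from rfl, List.cons_append, List.nil_append]
  cases rest with
  | nil =>
    simp only [pv_sw2nil, Bool.or_self]
    exact (decide_eq_false (by rintro ⟨h, -⟩; simp at h)).symm
  | cons d t =>
    simp only [pv_sw2]
    by_cases hd : d = ')'
    · subst hd
      have hiff : (1 ≤ (')' :: t).length ∧ c ∈ ['1', '2', '3', '4', '5', '6', '7', '8', '9'] ∧
          (')' :: t).headD ' ' = ')') ↔ c ∈ ['1', '2', '3', '4', '5', '6', '7', '8', '9'] := by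
        simp
      rw [decide_eq_decide.mpr hiff]
      by_cases g1 : c = '1'
      · subst g1; rfl
      by_cases g2 : c = '2'
      · subst g2; rfl
      by_cases g3 : c = '3'
      · subst g3; rfl
      by_cases g4 : c = '4'
      · subst g4; rfl
      by_cases g5 : c = '5'
      · subst g5; rfl
      by_cases g6 : c = '6'
      · subst g6; rfl
      by_cases g7 : c = '7'
      · subst g7; rfl
      by_cases g8 : c = '8'
      · subst g8; rfl
      by_cases g9 : c = '9'
      · subst g9; rfl
      have f1 : ('1' == c) = false := by simpa using Ne.symm g1
      have f2 : ('2' == c) = false := by simpa using Ne.symm g2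
      have f3 : ('3' == c) = false := by simpa using Ne.symm g3
      have f4 : ('4' == c) = false := by simpa using Ne.symm g4
      have f5 : ('5' == c) = false := by simpa using Ne.symm g5
      have f6 : ('6' == c) = false := by simpa using Ne.symm g6
      have f7 : ('7' == c) = false := by simpa using Ne.symm g7
      have f8 : ('8' == c) = false := by simpa using Ne.symm g8
      have f9 : ('9' == c) = false := by simpa using Ne.symm g9
      rw [decide_eq_false (by simp [g1, g2, g3, g4, g5, g6, g7, g8, g9])]
      simp [f1, f2, f3, f4, f5, f6, f7, f8, f9]
    · have bd : (')' == d) = false := by simpa using Ne.symm hd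
      have hr : ¬(1 ≤ (d :: t).length ∧ c ∈ ['1', '2', '3', '4', '5', '6', '7', '8', '9'] ∧
          (d :: t).headD ' ' = ')') := by
        rintro ⟨-, -, h⟩
        exact hd (by simpa using h)
      rw [decide_eq_false hr]
      simp [bd]

/-- A's bullet-line test, in pvMarker's terms -/
theorem pv_be_bul (c : Char) (rest : List Char) :
    (PySem.Chars.startswith (c :: rest) ['-'] || PySem.Chars.startswith (c :: rest) ['*'] ||
      PySem.Chars.startswith (c :: rest) ['<'] || PySem.Chars.startswith (c :: rest) ['#']) =
      decide (c ∈ ['-', '*', '<', '#']) := by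
  simp only [pv_sw1]
  by_cases h1 : c = '-'
  · subst h1; rfl
  by_cases h2 : c = '*'
  · subst h2; rfl
  by_cases h3 : c = '<'
  · subst h3; rfl
  by_cases h4 : c = '#'
  · subst h4; rfl
  have b1 : ('-' == c) = false := by simpa using Ne.symm h1
  have b2 : ('*' == c) = false := by simpa using Ne.symm h2
  have b3 : ('<' == c) = false := by simpa using Ne.symm h3
  have b4 : ('#' == c) = false := by simpa using Ne.symm h4
  rw [Bool.eq_iff_iff]
  simp [b1, b2, b3, b4, h1, h2, h3, h4]

theorem pv_slice_one (c : Char) (rest : List Char) :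
    PySem.List.slice (c :: rest) (some 1) none = rest := by
  simpa using PySem.List.slice_from (c :: rest) (a := 1) (by norm_num)

theorem pv_step_marker (l h : List Char) (hl : pvGood l)
    (hm : pvMarker l = some h) (acc : List (List Char)) (cur : List Char) :
    pvAStep (acc, cur) l =
      ((if cur ≠ [] then acc ++ [PySem.Chars.strip cur] else acc), h) := by
  cases l with
  | nil => exact absurd rfl hl.2.2
  | cons c rest =>
    simp only [pvMarker] at hm
    unfold pvAStep
    rw [pv_be_num, pv_be_bul]
    by_cases h1 : 1 ≤ rest.length ∧ c ∈ ['1', '2', '3', '4', '5', '6', '7', '8', '9'] ∧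
        rest.headD ' ' = ')'
    · rw [if_pos h1] at hm
      injection hm with hm
      simp only [decide_eq_true_eq]
      rw [if_pos h1]
      simp [hm]
    · rw [if_neg h1] at hm
      by_cases h2 : c ∈ ['-', '*', '<', '#']
      · rw [if_pos h2] at hm
        injection hm with hm
        simp only [decide_eq_true_eq]
        rw [if_neg h1, if_pos h2]
        simp [← hm, pv_slice_one]
      · rw [if_neg h2] at hm
        exact absurd hm (by simp)

theorem pv_marker_good (l h : List Char) (hl : pvGood l)
    (hm : pvMarker l = some h) : h = [] ∨ pvGood h := by
  cases l with
  | nil => exact absurd rfl hl.2.2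
  | cons c rest =>
    simp only [pvMarker] at hm
    split_ifs at hm with h1 h2
    · injection hm with hm
      right; rw [← hm]; exact hl
    · injection hm with hm
      by_cases hh : h = []
      · exact Or.inl hh
      · right
        rw [← hm] at hh ⊢
        exact pv_good_strip rest hh

theorem pv_step_cont (l : List Char) (hl : pvGood l) (hm : pvMarker l = none)
    (acc : List (List Char)) (cur : List Char) :
    pvAStep (acc, cur) l = (acc, cur ++ ' ' :: l) := by
  cases l with
  | nil => exact absurd rfl hl.2.2
  | cons c rest =>
    simp only [pvMarker] at hm
    split_ifs at hm with h1 h2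
    unfold pvAStep
    rw [pv_be_num, pv_be_bul]
    simp only [decide_eq_true_eq]
    rw [if_neg h1, if_neg h2]
    simp [pv_strip_good _ hl]

theorem pv_step_acc (acc : List (List Char)) (cur : List Char) (x : List Char) :
    pvAStep (acc, cur) x = (acc ++ (pvAStep ([], cur) x).1, (pvAStep ([], cur) x).2) := by
  unfold pvAStep
  split_ifs <;> simp

/-- the loop only appends to formatted_points -/
theorem pv_fold_acc (ls : List (List Char)) :
    ∀ (acc : List (List Char)) (cur : List Char),
      ls.foldl pvAStep (acc, cur) =
        (acc ++ (ls.foldl pvAStep ([], cur)).1, (ls.foldl pvAStep ([], cur)).2) := by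
  induction ls with
  | nil => intro acc cur; simp
  | cons x t ih =>
    intro acc cur
    simp only [List.foldl_cons]
    rw [pv_step_acc acc cur x, ih]
    conv_rhs => rw [pv_step_acc [] cur x, ih]
    simp [List.append_assoc]

/-- a run of continuation lines only grows current_point -/
theorem pv_fold_cont (conts : List (List Char))
    (h : ∀ c ∈ conts, (pvMarker c).isNone = true ∧ pvGood c) :
    ∀ (acc : List (List Char)) (cur : List Char),
      conts.foldl pvAStep (acc, cur) = (acc, cur ++ conts.flatMap (' ' :: ·)) := by
  induction conts with
  | nil => intro acc cur; simp
  | cons c t ih =>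
    intro acc cur
    obtain ⟨hm, hg⟩ := h c (by simp)
    have hm' : pvMarker c = none := Option.isNone_iff_eq_none.mp hm
    simp only [List.foldl_cons]
    rw [pv_step_cont c hg hm' acc cur, ih (fun x hx => h x (by simp [hx]))]
    simp [List.append_assoc]

/-- A's result from loop state (formatted_points = [], current_point = cur) -/
def pvApts (cur : List Char) (ls : List (List Char)) : List (List Char) :=
  let st := ls.foldl pvAStep ([], cur)
  if st.2 ≠ [] then st.1 ++ [PySem.Chars.strip st.2] else st.1

/-- the point a finished segment contributes -/
def pvEmit (cur : List Char) (conts : List (List Char)) : List (List Char) :=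
  if cur = [] then (if conts = [] then [] else [PySem.Chars.join [' '] conts])
  else [PySem.Chars.join [' '] (cur :: conts)]

theorem pv_emit_eq (cur : List Char) (conts : List (List Char))
    (hcur : cur = [] ∨ pvGood cur) (hc : ∀ c ∈ conts, pvGood c) :
    (if cur ++ conts.flatMap (' ' :: ·) ≠ [] then
        [PySem.Chars.strip (cur ++ conts.flatMap (' ' :: ·))] else []) =
      pvEmit cur conts := by
  rcases hcur with rfl | hg
  · cases conts with
    | nil => simp [pvEmit]
    | cons c r =>
      rw [if_pos (by simp)]
      rw [show ([] : List Char) ++ (c :: r).flatMap (' ' :: ·) = (c :: r).flatMap (' ' :: ·)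
        from by simp]
      rw [pv_strip_raw_nil _ hc (by simp)]
      simp [pvEmit]
  · have hne : cur ++ conts.flatMap (' ' :: ·) ≠ [] := by simp [hg.2.2]
    rw [if_pos hne, pv_strip_raw conts hc cur hg]
    simp [pvEmit, hg.2.2]

theorem pv_main_aux :
    ∀ (n : Nat) (ls : List (List Char)), ls.length ≤ n →
      (∀ l ∈ ls, pvGood l) → ∀ cur, cur = [] ∨ pvGood cur →
      pvApts cur ls =
        pvEmit cur (ls.takeWhile fun x => (pvMarker x).isNone) ++
          pvSegs (ls.dropWhile fun x => (pvMarker x).isNone) := by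
  intro n
  induction n with
  | zero =>
    intro ls hlen hls cur hcur
    have hnil : ls = [] := List.eq_nil_of_length_eq_zero (Nat.le_zero.mp hlen)
    subst hnil
    have h := pv_emit_eq cur [] hcur (by simp)
    simpa [pvApts, pvSegs] using h
  | succ n ih =>
    intro ls hlen hls cur hcur
    have hsplit := List.takeWhile_append_dropWhile
      (p := fun x => (pvMarker x).isNone) (l := ls)
    set conts := ls.takeWhile (fun x => (pvMarker x).isNone) with hconts
    set rest := ls.dropWhile (fun x => (pvMarker x).isNone) with hrest
    have hcont_prop : ∀ c ∈ conts, (pvMarker c).isNone = true ∧ pvGood c := by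
      intro c hcm
      rw [hconts] at hcm
      refine ⟨?_, hls c ((List.takeWhile_sublist _).subset hcm)⟩
      have h := List.mem_takeWhile_imp (p := fun x => (pvMarker x).isNone) hcm
      simpa using h
    have hcont_good : ∀ c ∈ conts, pvGood c := fun c hcm => (hcont_prop c hcm).2
    have key : pvApts cur ls = pvApts (cur ++ conts.flatMap (' ' :: ·)) rest := by
      unfold pvApts
      conv_lhs => rw [← hsplit]
      rw [List.foldl_append, pv_fold_cont conts hcont_prop [] cur]
    cases hr : rest with
    | nil =>
      rw [key, hr]
      have h := pv_emit_eq cur conts hcur hcont_good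
      simpa [pvApts, pvSegs] using h
    | cons x r2 =>
      have hxls : x ∈ ls := by
        rw [← hsplit, hr]; simp
      have hxg : pvGood x := hls x hxls
      have hpx : (pvMarker x).isNone = false := by
        simpa using pv_dropWhile_head_false (fun y => (pvMarker y).isNone) ls x r2
          (by rw [← hrest]; exact hr)
      obtain ⟨h, hm⟩ : ∃ h, pvMarker x = some h := by
        cases hmx : pvMarker x with
        | none => rw [hmx] at hpx; simp at hpx
        | some v => exact ⟨v, rfl⟩
      have hr2len : r2.length ≤ n := by
        have h1 := List.length_dropWhile_le (fun y => (pvMarker y).isNone) ls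
        rw [← hrest, hr] at h1
        simp at h1
        omega
      have hr2good : ∀ l ∈ r2, pvGood l := by
        intro l hl
        refine hls l ?_
        rw [← hsplit, hr]
        simp [hl]
      have hhg : h = [] ∨ pvGood h := pv_marker_good x h hxg hm
      have hIH := ih r2 hr2len hr2good h hhg
      rw [key, hr]
      unfold pvApts
      simp only [List.foldl_cons]
      rw [pv_step_marker x h hxg hm, pv_fold_acc]
      dsimp only [List.nil_append]
      have hEmit := pv_emit_eq cur conts hcur hcont_good
      have hsplitL :
          (if (r2.foldl pvAStep ([], h)).2 ≠ [] then
              ((if cur ++ conts.flatMap (' ' :: ·) ≠ [] then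
                  [PySem.Chars.strip (cur ++ conts.flatMap (' ' :: ·))] else []) ++
                (r2.foldl pvAStep ([], h)).1) ++
                [PySem.Chars.strip (r2.foldl pvAStep ([], h)).2]
            else
              (if cur ++ conts.flatMap (' ' :: ·) ≠ [] then
                  [PySem.Chars.strip (cur ++ conts.flatMap (' ' :: ·))] else []) ++
                (r2.foldl pvAStep ([], h)).1) =
            pvEmit cur conts ++ pvApts h r2 := by
      -- factor the already-emitted point out of the final if
        rw [← hEmit]
        unfold pvApts
        by_cases hq : (r2.foldl pvAStep ([], h)).2 = [] <;>
          simp [hq, List.append_assoc]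
      rw [hsplitL, hIH]
      simp only [pvSegs, hm]
      by_cases hh : h = []
      · by_cases hc2 : (r2.takeWhile fun y => (pvMarker y).isNone) = [] <;>
          simp [pvEmit, hh, hc2]
      · simp [pvEmit, hh]

theorem pv_lines_good (text : String) :
    ∀ l ∈ ((PySem.Chars.splitOn text.toList ['\n']).map PySem.Chars.strip).filter
        (fun l => !l.isEmpty), pvGood l := by
  intro l hl
  rw [List.mem_filter] at hl
  obtain ⟨hmem, hne⟩ := hl
  rw [List.mem_map] at hmem
  obtain ⟨s, -, rfl⟩ := hmem
  refine pv_good_strip s ?_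
  simpa using hne

-- ===== VERDICT (by name: the statement is the Claim_ definition above) =====
theorem format_to_points_spec : Claim_equal_format_to_points := by
  intro text un _
  show format_to_points text un = format_to_points_alt text un
  unfold format_to_points format_to_points_alt
  dsimp only
  set L := ((PySem.Chars.splitOn text.toList ['\n']).map PySem.Chars.strip).filter
      (fun l => !l.isEmpty) with hL
  have hg : ∀ l ∈ L, pvGood l := by rw [hL]; exact pv_lines_good text
  have h := pv_main_aux L.length L le_rfl hg [] (Or.inl rfl)
  have hpts :
      (if (L.foldl pvAStep ([], [])).2 ≠ [] then
          (L.foldl pvAStep ([], [])).1 ++ [PySem.Chars.strip (L.foldl pvAStep ([], [])).2]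
        else (L.foldl pvAStep ([], [])).1) =
        (if (L.takeWhile fun x => (pvMarker x).isNone) ≠ [] then
            [PySem.Chars.join [' '] (L.takeWhile fun x => (pvMarker x).isNone)] else []) ++
          pvSegs (L.dropWhile fun x => (pvMarker x).isNone) := by
    rw [show (if (L.foldl pvAStep ([], [])).2 ≠ [] then
          (L.foldl pvAStep ([], [])).1 ++ [PySem.Chars.strip (L.foldl pvAStep ([], [])).2]
        else (L.foldl pvAStep ([], [])).1) = pvApts [] L from rfl]
    rw [h]
    by_cases hld : (L.takeWhile fun x => (pvMarker x).isNone) = [] <;> simp [pvEmit, hld]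
  rw [hpts]
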